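-- pv_equiv track=rewrite | github.com/am794/CPBS_repository | Module4Day3_Assignment/GA_Functions.py | bin_dictionary
-- ===== SOURCE A (Python) =====
-- def bin_dictionary(gene_freq,fa_set,num_bins=100,filter_bin_data=True):
--     min_freq = min(gene_freq.values())
--     max_freq = max(gene_freq.values())
--     bin_width = (max_freq - min_freq)//num_bins
--
--     bin_diction = {}
--     for i in range(num_bins):
--         lower_bound = int(min_freq + i*bin_width) #lower  bound of each bin
--         upper_bound = int(lower_bound + bin_width) #upper bound of each bin
--         bin_diction[str(lower_bound)+'-'+str(upper_bound)]={}
--         bin_diction[str(lower_bound)+'-'+str(upper_bound)]["fa_genes"]=[]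
--         bin_diction[str(lower_bound)+'-'+str(upper_bound)]["non_fa_genes"]=[]
--         for gene,freq in gene_freq.items():
--             if freq >= lower_bound and freq < upper_bound:
--                 if gene in fa_set:
--                     bin_diction[str(lower_bound)+'-'+str(upper_bound)]["fa_genes"].append(gene)  #assigning FA genes to bins
--                 else:
--                     bin_diction[str(lower_bound)+'-'+str(upper_bound)]["non_fa_genes"].append(gene) # assigning non-FA genes to bins
--
--     # filter the bin_diction to remove non-fa genes that do not have any fa genes in a specific bin
--     if filter_bin_data == True:
--         empty_keys = []
--         filtered_bin_diction = {}
--         for outer_key, inner_dict in bin_diction.items():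
--             for inner_key, inner_value in inner_dict.items():
--                 if not inner_value and inner_key == 'fa_genes':
--                    empty_keys.append((outer_key))  # empty keys are the bins that do not have fa genes
--                    break
--
--         filtered_bin_diction = {k:v for k,v in bin_diction.items() if k not in empty_keys} # remove non-fa genes that do not have fa genes in the associated bin
--         return bin_diction,filtered_bin_diction,empty_keys
--
--     else:
--         return bin_diction
-- ===== SOURCE B (Python) =====
-- def bin_dictionary(gene_freq, fa_set, num_bins=100, filter_bin_data=True):
--     vals = gene_freq.values()
--     lo = min(vals)
--     hi = max(vals)
--     w = (hi - lo) // num_bins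
--     n = num_bins if num_bins > 0 else 0
--     fa_bins = [[] for _ in range(n)]
--     non_fa_bins = [[] for _ in range(n)]
--     if w > 0:
--         fa = set(fa_set)
--         for gene, freq in gene_freq.items():
--             idx = (freq - lo) // w
--             if idx < n:
--                 (fa_bins if gene in fa else non_fa_bins)[idx].append(gene)
--     bin_diction = {}
--     for i in range(n):
--         key = str(lo + i * w) + '-' + str(lo + (i + 1) * w)
--         bin_diction[key] = {"fa_genes": fa_bins[i], "non_fa_genes": non_fa_bins[i]}
--     if filter_bin_data:
--         empty_keys = [k for k, v in bin_diction.items() if not v["fa_genes"]]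
--         filtered_bin_diction = {k: v for k, v in bin_diction.items() if v["fa_genes"]}
--         return bin_diction, filtered_bin_diction, empty_keys
--     return bin_diction
-- ===== Notes on version B (the rewrite author's own statement) =====
-- stated objective: faster
-- what changed: A rescans all genes once per bin (nested loops); B computes each gene's bin index directly by one floor division in a single pass over the genes and then assembles the precomputed per-bin lists.
-- outside the precondition, e.g. on bin_dictionary({}, set(), 2, True): A raises ValueError, B raises ValueError; on bin_dictionary({'g': 1}, set(), 0, True): A raises ZeroDivisionError, B raises ZeroDivisionError
import Mathlib
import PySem

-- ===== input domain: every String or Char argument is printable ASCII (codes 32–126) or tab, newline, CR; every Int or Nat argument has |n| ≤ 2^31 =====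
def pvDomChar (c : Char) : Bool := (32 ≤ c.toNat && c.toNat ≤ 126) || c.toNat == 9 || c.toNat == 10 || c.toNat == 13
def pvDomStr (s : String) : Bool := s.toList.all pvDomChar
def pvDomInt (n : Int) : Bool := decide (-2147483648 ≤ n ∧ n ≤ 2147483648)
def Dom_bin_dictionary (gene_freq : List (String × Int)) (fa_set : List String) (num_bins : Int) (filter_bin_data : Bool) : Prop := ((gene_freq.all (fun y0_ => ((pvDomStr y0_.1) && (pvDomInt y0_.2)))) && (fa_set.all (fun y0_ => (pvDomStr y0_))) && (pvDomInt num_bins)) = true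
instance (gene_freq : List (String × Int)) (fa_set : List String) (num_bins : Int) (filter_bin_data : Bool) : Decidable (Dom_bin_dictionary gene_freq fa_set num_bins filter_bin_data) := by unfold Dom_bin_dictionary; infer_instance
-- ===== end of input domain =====

-- B bins each gene by a directly computed bin index in one pass instead of rescanning all genes for every bin (objective: faster).
-- Pre_ excludes inputs where Python A raises (empty gene_freq: ValueError from min(); num_bins = 0: ZeroDivisionError) and
-- filter_bin_data = False, where A returns only the single dict, which is not a value of the declared triple type.


-- ===== PORT A =====
-- str(lb) + '-' + str(ub)   (the bin label)
def mkKey (lb ub : Int) : String := PySem.Int.toStr lb ++ "-" ++ PySem.Int.toStr ub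

-- A's inner loop over inner_dict.items() with its break: true iff it appends the outer key
def bdFindEmptyFa : List (String × List String) → Bool
  | [] => false
  | (ik, iv) :: rest => if iv = [] ∧ ik = "fa_genes" then true else bdFindEmptyFa rest

def bin_dictionary (gene_freq : List (String × Int)) (fa_set : List String) (num_bins : Int) (filter_bin_data : Bool) : (List (String × List (String × List String))) × (List (String × List (String × List String))) × List String :=
  let gf : PySem.Dict String Int := PySem.Dict.ofList gene_freq  -- the dict argument (unique keys, insertion order)
  match PySem.List.min? gf.values (fun x => x), PySem.List.max? gf.values (fun x => x) with
  | some min_freq, some max_freq =>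
    let bin_width := PySem.Int.floordiv (max_freq - min_freq) num_bins  -- num_bins ≠ 0 by Pre_
    let bin_diction : PySem.Dict String (PySem.Dict String (List String)) :=
      (PySem.List.pyRange 0 num_bins 1).foldl (fun bd i =>
        let lower_bound := min_freq + i * bin_width
        let upper_bound := lower_bound + bin_width
        let bd := bd.insert (mkKey lower_bound upper_bound) PySem.Dict.empty
        let bd := bd.modify (mkKey lower_bound upper_bound) PySem.Dict.empty (fun inner => inner.insert "fa_genes" [])
        let bd := bd.modify (mkKey lower_bound upper_bound) PySem.Dict.empty (fun inner => inner.insert "non_fa_genes" [])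
        gf.items.foldl (fun bd p =>
          if p.2 ≥ lower_bound ∧ p.2 < upper_bound then
            if fa_set.contains p.1 then
              bd.modify (mkKey lower_bound upper_bound) PySem.Dict.empty (fun inner => inner.modify "fa_genes" [] (fun s => s ++ [p.1]))
            else
              bd.modify (mkKey lower_bound upper_bound) PySem.Dict.empty (fun inner => inner.modify "non_fa_genes" [] (fun s => s ++ [p.1]))
          else bd) bd) PySem.Dict.empty
    if filter_bin_data then
      let empty_keys := bin_diction.items.foldl (fun ek p => if bdFindEmptyFa p.2.items then ek ++ [p.1] else ek) []
      let filtered := PySem.Dict.ofList (bin_diction.items.filter (fun p => !(empty_keys.contains p.1)))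
      (bin_diction.items.map (fun p => (p.1, p.2.items)),
       filtered.items.map (fun p => (p.1, p.2.items)),
       empty_keys)
    else
      -- Python returns only bin_diction here (not a triple of the declared type); excluded by Pre_
      (bin_diction.items.map (fun p => (p.1, p.2.items)), [], [])
  | _, _ => ([], [], [])  -- Python raises ValueError (empty gene_freq); excluded by Pre_

-- ===== PORT B =====
-- str(lb) + '-' + str(ub)   (same expression in Source B)
def mkKeyB (lb ub : Int) : String := PySem.Int.toStr lb ++ "-" ++ PySem.Int.toStr ub

def bin_dictionary_alt (gene_freq : List (String × Int)) (fa_set : List String) (num_bins : Int) (filter_bin_data : Bool) : (List (String × List (String × List String))) × (List (String × List (String × List String))) × List String :=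
  let gf : PySem.Dict String Int := PySem.Dict.ofList gene_freq
  match PySem.List.min? gf.values (fun x => x) with
  | none => ([], [], [])  -- Python raises ValueError (empty gene_freq); excluded by Pre_
  | some lo =>
  match PySem.List.max? gf.values (fun x => x) with
  | none => ([], [], [])
  | some hi =>
    let w := PySem.Int.floordiv (hi - lo) num_bins  -- num_bins ≠ 0 by Pre_
    let n : Nat := if 0 < num_bins then num_bins.toNat else 0
    let init : List (List String) × List (List String) := (List.replicate n [], List.replicate n [])
    let bins :=
      if 0 < w then
        let fa := PySem.Set.ofList fa_set
        gf.items.foldl (fun bins p =>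
          let idx := PySem.Int.floordiv (p.2 - lo) w
          if idx < (n : Int) then
            if PySem.Set.contains fa p.1 then
              (PySem.List.pySetD bins.1 idx (PySem.List.pyGetD bins.1 idx [] ++ [p.1]), bins.2)
            else
              (bins.1, PySem.List.pySetD bins.2 idx (PySem.List.pyGetD bins.2 idx [] ++ [p.1]))
          else bins) init
      else init
    let bd : PySem.Dict String (PySem.Dict String (List String)) :=
      (List.range n).foldl (fun bd (i : Nat) =>
        bd.insert (mkKeyB (lo + (i : Int) * w) (lo + ((i : Int) + 1) * w))
          ((PySem.Dict.empty.insert "fa_genes" (bins.1.getD i [])).insert "non_fa_genes" (bins.2.getD i []))) PySem.Dict.empty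
    if filter_bin_data then
      let empty_keys := (bd.items.filter (fun p => p.2.getD "fa_genes" [] == [])).map (fun p => p.1)
      let filtered := PySem.Dict.ofList (bd.items.filter (fun p => !(p.2.getD "fa_genes" [] == [])))
      (bd.items.map (fun p => (p.1, p.2.items)),
       filtered.items.map (fun p => (p.1, p.2.items)),
       empty_keys)
    else
      (bd.items.map (fun p => (p.1, p.2.items)), [], [])

-- ===== PRECONDITION & SPEC =====
-- Pre_ excludes: empty gene_freq (A raises ValueError in min()), num_bins = 0 (A raises ZeroDivisionError),
-- and filter_bin_data = false, where A returns a single dict rather than a value of the declared triple type.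
def Pre_bin_dictionary (gene_freq : List (String × Int)) (fa_set : List String) (num_bins : Int) (filter_bin_data : Bool) : Prop :=
  gene_freq ≠ [] ∧ num_bins ≠ 0 ∧ filter_bin_data = true
instance (gene_freq : List (String × Int)) (fa_set : List String) (num_bins : Int) (filter_bin_data : Bool) : Decidable (Pre_bin_dictionary gene_freq fa_set num_bins filter_bin_data) := by unfold Pre_bin_dictionary; infer_instance

def pvWitness_bin_dictionary : (List (String × Int)) × List String × Int × Bool := ([("g", 1), ("h", 5)], ["g"], 2, true)

def Spec_bin_dictionary (gene_freq : List (String × Int)) (fa_set : List String) (num_bins : Int) (filter_bin_data : Bool) (out : (List (String × List (String × List String))) × (List (String × List (String × List String))) × List String) : Prop := out = bin_dictionary_alt gene_freq fa_set num_bins filter_bin_data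
instance (gene_freq : List (String × Int)) (fa_set : List String) (num_bins : Int) (filter_bin_data : Bool) (out : (List (String × List (String × List String))) × (List (String × List (String × List String))) × List String) : Decidable (Spec_bin_dictionary gene_freq fa_set num_bins filter_bin_data out) := by unfold Spec_bin_dictionary; infer_instance

-- ===== CLAIM (what is proved, stated in full; the proofs are below) =====
def Claim_equal_bin_dictionary : Prop := ∀ (gene_freq : List (String × Int)) (fa_set : List String) (num_bins : Int) (filter_bin_data : Bool), Dom_bin_dictionary gene_freq fa_set num_bins filter_bin_data → Pre_bin_dictionary gene_freq fa_set num_bins filter_bin_data → Spec_bin_dictionary gene_freq fa_set num_bins filter_bin_data (bin_dictionary gene_freq fa_set num_bins filter_bin_data)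

-- ===== LEMMAS AND PROOFS =====

theorem mkKeyB_eq (lb ub : Int) : mkKeyB lb ub = mkKey lb ub := rfl

theorem bd_modify_insert {ν : Type} (d : PySem.Dict String ν) (k : String) (d0 : ν) (f : ν → ν) (v : ν) :
    (d.insert k v).modify k d0 f = d.insert k (f v) := by
  simp [PySem.Dict.modify, PySem.Dict.getD_insert_self, PySem.Dict.insert_insert_self]

-- A's gene loop keeps all its modifications at the single key k: it only rewrites that entry
theorem geneFoldA (l : List (String × Int)) (fa_set : List String) (lb ub : Int) (k : String)
    (d : PySem.Dict String (PySem.Dict String (List String))) (v : PySem.Dict String (List String)) :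
    l.foldl (fun bd p =>
      if p.2 ≥ lb ∧ p.2 < ub then
        if fa_set.contains p.1 then
          bd.modify k PySem.Dict.empty (fun inner => inner.modify "fa_genes" [] (fun s => s ++ [p.1]))
        else
          bd.modify k PySem.Dict.empty (fun inner => inner.modify "non_fa_genes" [] (fun s => s ++ [p.1]))
      else bd) (d.insert k v)
    = d.insert k (l.foldl (fun inner p =>
        if p.2 ≥ lb ∧ p.2 < ub then
          if fa_set.contains p.1 then inner.modify "fa_genes" [] (fun s => s ++ [p.1])
          else inner.modify "non_fa_genes" [] (fun s => s ++ [p.1])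
        else inner) v) := by
  induction l generalizing v with
  | nil => rfl
  | cons p t ih =>
    simp only [List.foldl_cons]
    split_ifs <;> first | (rw [bd_modify_insert]; exact ih _) | exact ih v

theorem modify_fa (a b : List String) (g : List String → List String) :
    ((PySem.Dict.empty.insert "fa_genes" a).insert "non_fa_genes" b).modify "fa_genes" [] g
      = (PySem.Dict.empty.insert "fa_genes" (g a)).insert "non_fa_genes" b := by
  simp [PySem.Dict.modify, PySem.Dict.insert, PySem.Dict.getD, PySem.Dict.get?, PySem.Dict.contains, PySem.Dict.empty]

theorem modify_non (a b : List String) (g : List String → List String) :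
    ((PySem.Dict.empty.insert "fa_genes" a).insert "non_fa_genes" b).modify "non_fa_genes" [] g
      = (PySem.Dict.empty.insert "fa_genes" a).insert "non_fa_genes" (g b) := by
  simp [PySem.Dict.modify, PySem.Dict.insert, PySem.Dict.getD, PySem.Dict.get?, PySem.Dict.contains, PySem.Dict.empty]

theorem innerFoldA (l : List (String × Int)) (fa_set : List String) (lb ub : Int) (a b : List String) :
    l.foldl (fun inner p =>
        if p.2 ≥ lb ∧ p.2 < ub then
          if fa_set.contains p.1 then inner.modify "fa_genes" [] (fun s => s ++ [p.1])
          else inner.modify "non_fa_genes" [] (fun s => s ++ [p.1])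
        else inner) ((PySem.Dict.empty.insert "fa_genes" a).insert "non_fa_genes" b)
    = (PySem.Dict.empty.insert "fa_genes"
        (a ++ (l.filter (fun p => decide (p.2 ≥ lb ∧ p.2 < ub) && fa_set.contains p.1)).map (fun p => p.1))).insert "non_fa_genes"
        (b ++ (l.filter (fun p => decide (p.2 ≥ lb ∧ p.2 < ub) && !fa_set.contains p.1)).map (fun p => p.1)) := by
  induction l generalizing a b with
  | nil => simp
  | cons p t ih =>
    simp only [List.foldl_cons, List.filter_cons]
    by_cases hc : p.2 ≥ lb ∧ p.2 < ub
    · by_cases hf : fa_set.contains p.1 = true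
      · have hm : p.1 ∈ fa_set := by simpa using hf
        rw [if_pos hc, if_pos hf, modify_fa, ih]
        simp [hc, hm]
      · have hnm : p.1 ∉ fa_set := by simpa using hf
        rw [if_pos hc, if_neg hf, modify_non, ih]
        simp [hc, hnm]
    · rw [if_neg hc, ih]
      simp [hc]

-- B's one-pass binning step (definitionally the lambda in bin_dictionary_alt)
def binsStep (fa : PySem.Set String) (lo w : Int) (n : Nat) (bins : List (List String) × List (List String)) (p : String × Int) : List (List String) × List (List String) :=
  let idx := PySem.Int.floordiv (p.2 - lo) w
  if idx < (n : Int) then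
    if PySem.Set.contains fa p.1 then
      (PySem.List.pySetD bins.1 idx (PySem.List.pyGetD bins.1 idx [] ++ [p.1]), bins.2)
    else
      (bins.1, PySem.List.pySetD bins.2 idx (PySem.List.pyGetD bins.2 idx [] ++ [p.1]))
  else bins

theorem getD_set_eq' (A : List (List String)) (j : Nat) (v : List String) (i : Nat) :
    (A.set j v).getD i [] = if j = i ∧ j < A.length then v else A.getD i [] := by
  rw [List.getD_eq_getElem?_getD, List.getElem?_set, List.getD_eq_getElem?_getD]
  split_ifs with h1 h2 h3 <;> simp_all <;> omega

theorem binsFoldB (l : List (String × Int)) (fa : PySem.Set String) (lo w : Int) (n : Nat) (hw : 0 < w)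
    (hlo : ∀ p ∈ l, lo ≤ p.2) (A B : List (List String)) (hA : A.length = n) (hB : B.length = n) :
    (l.foldl (binsStep fa lo w n) (A, B)).1.length = n ∧
    (l.foldl (binsStep fa lo w n) (A, B)).2.length = n ∧
    ∀ i : Nat, i < n →
      (l.foldl (binsStep fa lo w n) (A, B)).1.getD i []
        = A.getD i [] ++ (l.filter (fun p => PySem.Int.floordiv (p.2 - lo) w == (i : Int) && PySem.Set.contains fa p.1)).map (fun p => p.1) ∧
      (l.foldl (binsStep fa lo w n) (A, B)).2.getD i []
        = B.getD i [] ++ (l.filter (fun p => PySem.Int.floordiv (p.2 - lo) w == (i : Int) && !PySem.Set.contains fa p.1)).map (fun p => p.1) := by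
  induction l generalizing A B with
  | nil => exact ⟨hA, hB, fun i hi => ⟨by simp, by simp⟩⟩
  | cons p t ih =>
    have hq0 : 0 ≤ PySem.Int.floordiv (p.2 - lo) w := by
      rw [PySem.Int.floordiv_eq_ediv_of_pos hw]
      exact Int.ediv_nonneg (by have := hlo p (by simp); omega) (le_of_lt hw)
    have hlo' : ∀ q ∈ t, lo ≤ q.2 := fun q hq => hlo q (by simp [hq])
    simp only [List.foldl_cons]
    by_cases hqn : PySem.Int.floordiv (p.2 - lo) w < (n : Int)
    · by_cases hfa : PySem.Set.contains fa p.1 = true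
      · have hmem : p.1 ∈ fa := (PySem.Set.contains_iff fa p.1).mp hfa
        have hstep : binsStep fa lo w n (A, B) p
            = (A.set (PySem.Int.floordiv (p.2 - lo) w).toNat
                (A.getD (PySem.Int.floordiv (p.2 - lo) w).toNat [] ++ [p.1]), B) := by
          simp only [binsStep, hqn, hfa, if_true]
          rw [PySem.List.pySetD_of_nonneg _ _ hq0, PySem.List.pyGetD_eq_getElem _ _ hq0 (by omega)]
          rw [List.getD_eq_getElem?_getD, List.getElem?_eq_getElem (by omega)]
          rfl
        rw [hstep]
        obtain ⟨ih1, ih2, ih3⟩ := ih hlo' (A.set (PySem.Int.floordiv (p.2 - lo) w).toNat (A.getD (PySem.Int.floordiv (p.2 - lo) w).toNat [] ++ [p.1])) B (by simp [hA]) hB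
        refine ⟨ih1, ih2, fun i hi => ?_⟩
        obtain ⟨e1, e2⟩ := ih3 i hi
        constructor
        · rw [e1, List.filter_cons, getD_set_eq']
          by_cases hqi : PySem.Int.floordiv (p.2 - lo) w = (i : Int)
          · have ht : (PySem.Int.floordiv (p.2 - lo) w).toNat = i := by omega
            simp [ht, hA, hi, hqi, hfa, hmem]
          · have ht : ¬ ((PySem.Int.floordiv (p.2 - lo) w).toNat = i ∧ (PySem.Int.floordiv (p.2 - lo) w).toNat < A.length) := by
              intro ⟨h1, _⟩; omega
            simp only [if_neg ht]
            have : (PySem.Int.floordiv (p.2 - lo) w == (i : Int)) = false := by simp [hqi]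
            simp [this, hmem]
        · rw [e2, List.filter_cons]
          have : (PySem.Int.floordiv (p.2 - lo) w == (i : Int) && !PySem.Set.contains fa p.1) = false := by
            simp [hmem]
          simp [this, hmem]
      · have hnmem : ¬ p.1 ∈ fa := fun h => hfa ((PySem.Set.contains_iff fa p.1).mpr h)
        have hstep : binsStep fa lo w n (A, B) p
            = (A, B.set (PySem.Int.floordiv (p.2 - lo) w).toNat
                (B.getD (PySem.Int.floordiv (p.2 - lo) w).toNat [] ++ [p.1])) := by
          simp only [binsStep, hqn, hfa, if_true, if_false, Bool.false_eq_true]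
          rw [PySem.List.pySetD_of_nonneg _ _ hq0, PySem.List.pyGetD_eq_getElem _ _ hq0 (by omega)]
          rw [List.getD_eq_getElem?_getD, List.getElem?_eq_getElem (by omega)]
          rfl
        rw [hstep]
        obtain ⟨ih1, ih2, ih3⟩ := ih hlo' A (B.set (PySem.Int.floordiv (p.2 - lo) w).toNat (B.getD (PySem.Int.floordiv (p.2 - lo) w).toNat [] ++ [p.1])) hA (by simp [hB])
        refine ⟨ih1, ih2, fun i hi => ?_⟩
        obtain ⟨e1, e2⟩ := ih3 i hi
        constructor
        · rw [e1, List.filter_cons]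
          have : (PySem.Int.floordiv (p.2 - lo) w == (i : Int) && PySem.Set.contains fa p.1) = false := by
            simp [hnmem]
          simp [this, hnmem]
        · rw [e2, List.filter_cons, getD_set_eq']
          by_cases hqi : PySem.Int.floordiv (p.2 - lo) w = (i : Int)
          · have ht : (PySem.Int.floordiv (p.2 - lo) w).toNat = i := by omega
            simp [ht, hB, hi, hqi, hfa, hnmem]
          · have ht : ¬ ((PySem.Int.floordiv (p.2 - lo) w).toNat = i ∧ (PySem.Int.floordiv (p.2 - lo) w).toNat < B.length) := by
              intro ⟨h1, _⟩; omega
            simp only [if_neg ht]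
            have : (PySem.Int.floordiv (p.2 - lo) w == (i : Int)) = false := by simp [hqi]
            simp [this, hnmem]
    · have hstep : binsStep fa lo w n (A, B) p = (A, B) := by
        simp only [binsStep, hqn, if_false]
      rw [hstep]
      obtain ⟨ih1, ih2, ih3⟩ := ih hlo' A B hA hB
      refine ⟨ih1, ih2, fun i hi => ?_⟩
      obtain ⟨e1, e2⟩ := ih3 i hi
      have hne : (PySem.Int.floordiv (p.2 - lo) w == (i : Int)) = false := by
        simp; omega
      constructor
      · rw [e1, List.filter_cons]; simp [hne]
      · rw [e2, List.filter_cons]; simp [hne]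

theorem contains_map_fst_filter {α : Type} (l : List (String × α)) (P : String × α → Bool)
    (hn : (l.map (fun p => p.1)).Nodup) (p : String × α) (hp : p ∈ l) :
    ((l.filter P).map (fun p => p.1)).contains p.1 = P p := by
  induction l with
  | nil => cases hp
  | cons q t ih =>
    simp only [List.map_cons, List.nodup_cons] at hn
    obtain ⟨hq, hn'⟩ := hn
    rcases List.mem_cons.mp hp with hpq | hpt
    · subst hpq
      by_cases hP : P p = true
      · simp [List.filter_cons, hP]
      · simp only [Bool.not_eq_true] at hP
        rw [List.filter_cons, if_neg (by simp [hP]), hP]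
        simp only [List.contains_eq_mem, decide_eq_false_iff_not]
        intro hmem
        exact hq (by
          obtain ⟨r, hr, hre⟩ := List.mem_map.mp hmem
          obtain ⟨hrt, _⟩ := List.mem_filter.mp hr
          exact hre ▸ List.mem_map_of_mem hrt)
    · have hne : p.1 ≠ q.1 := fun h => hq (h ▸ List.mem_map_of_mem hpt)
      rw [List.filter_cons]
      by_cases hP : P q = true
      · simp only [hP, if_pos, List.map_cons, List.contains_cons]
        rw [ih hn' hpt]
        simp [hne]
      · simp only [Bool.not_eq_true] at hP
        rw [if_neg (by simp [hP])]
        exact ih hn' hpt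

-- every value sitting in a keyed insert-fold satisfies Q if all inserted values do
theorem shape_foldl_insert {β : Type} (L : List β) (key : β → String)
    (val : β → PySem.Dict String (List String)) (Q : PySem.Dict String (List String) → Prop)
    (d : PySem.Dict String (PySem.Dict String (List String)))
    (hd : ∀ p ∈ d.items, Q p.2) (hv : ∀ x ∈ L, Q (val x)) :
    ∀ p ∈ (L.foldl (fun d x => d.insert (key x) (val x)) d).items, Q p.2 := by
  induction L generalizing d with
  | nil => exact hd
  | cons x t ih =>
    simp only [List.foldl_cons]
    refine ih _ (fun p hp => ?_) (fun y hy => hv y (by simp [hy]))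
    rcases (PySem.Dict.mem_items_insert _ _ _ _).mp hp with h | ⟨h, _⟩
    · subst h; exact hv x (by simp)
    · exact hd p h

theorem inner_items (a b : List String) :
    ((PySem.Dict.empty.insert "fa_genes" a).insert "non_fa_genes" b).items = [("fa_genes", a), ("non_fa_genes", b)] := by
  simp [PySem.Dict.insert, PySem.Dict.contains, PySem.Dict.empty]

theorem inner_getD (a b : List String) :
    ((PySem.Dict.empty.insert "fa_genes" a).insert "non_fa_genes" b).getD "fa_genes" [] = a := by
  simp [PySem.Dict.insert, PySem.Dict.getD, PySem.Dict.get?, PySem.Dict.contains, PySem.Dict.empty]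

theorem findEmpty_inner (a b : List String) :
    bdFindEmptyFa ((PySem.Dict.empty.insert "fa_genes" a).insert "non_fa_genes" b).items = (a == []) := by
  rw [inner_items]
  by_cases h : a = []
  · simp [bdFindEmptyFa, h]
  · simp [bdFindEmptyFa, h]

theorem size_le_foldl_insert {κ ν : Type} [BEq κ] (l : List (κ × ν)) (d : PySem.Dict κ ν) :
    d.size ≤ (l.foldl (fun acc p => acc.insert p.1 p.2) d).size := by
  induction l generalizing d with
  | nil => exact le_refl _
  | cons x t ih =>
    refine le_trans ?_ (ih (d.insert x.1 x.2))
    rw [PySem.Dict.size_insert]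
    split_ifs <;> omega

theorem ofList_items_ne_nil {κ ν : Type} [BEq κ] (x : κ × ν) (t : List (κ × ν)) :
    (PySem.Dict.ofList (x :: t)).items ≠ [] := by
  intro h
  have h1 : (PySem.Dict.ofList (x :: t)).size = 0 := by simp [PySem.Dict.size, h]
  have h2 := size_le_foldl_insert t (PySem.Dict.empty.insert x.1 x.2)
  rw [PySem.Dict.size_insert] at h2
  simp only [PySem.Dict.ofList, PySem.Dict.update, List.foldl_cons] at h1
  simp [PySem.Dict.contains_empty] at h2
  rw [h1] at h2
  simp [PySem.Dict.size] at h2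

-- B's per-bin insert step (definitionally the lambda in bin_dictionary_alt's dict-building loop)
def bStep (lo W : Int) (bins : List (List String) × List (List String))
    (bd : PySem.Dict String (PySem.Dict String (List String))) (i : Nat) : PySem.Dict String (PySem.Dict String (List String)) :=
  bd.insert (mkKeyB (lo + (i : Int) * W) (lo + ((i : Int) + 1) * W))
    ((PySem.Dict.empty.insert "fa_genes" (bins.1.getD i [])).insert "non_fa_genes" (bins.2.getD i []))

-- A's per-bin step (definitionally the lambda in bin_dictionary's bin loop, lets zeta-reduced)
def aStep (fa_set : List String) (lo W : Int) (G : List (String × Int))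
    (bd : PySem.Dict String (PySem.Dict String (List String))) (i : Int) : PySem.Dict String (PySem.Dict String (List String)) :=
  G.foldl (fun bd p =>
      if p.2 ≥ lo + i * W ∧ p.2 < lo + i * W + W then
        if fa_set.contains p.1 then
          bd.modify (mkKey (lo + i * W) (lo + i * W + W)) PySem.Dict.empty (fun inner => inner.modify "fa_genes" [] (fun s => s ++ [p.1]))
        else
          bd.modify (mkKey (lo + i * W) (lo + i * W + W)) PySem.Dict.empty (fun inner => inner.modify "non_fa_genes" [] (fun s => s ++ [p.1]))
      else bd)
    (((bd.insert (mkKey (lo + i * W) (lo + i * W + W)) PySem.Dict.empty).modify (mkKey (lo + i * W) (lo + i * W + W)) PySem.Dict.empty (fun inner => inner.insert "fa_genes" [])).modify (mkKey (lo + i * W) (lo + i * W + W)) PySem.Dict.empty (fun inner => inner.insert "non_fa_genes" []))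

def aBD (l : List (String × Int)) (fa_set : List String) (num_bins lo W : Int) : PySem.Dict String (PySem.Dict String (List String)) :=
  (PySem.List.pyRange 0 num_bins 1).foldl (aStep fa_set lo W (PySem.Dict.ofList l).items) PySem.Dict.empty

def bBins (l : List (String × Int)) (fa_set : List String) (num_bins lo W : Int) : List (List String) × List (List String) :=
  if 0 < W then
    (PySem.Dict.ofList l).items.foldl
      (binsStep (PySem.Set.ofList fa_set) lo W (if 0 < num_bins then num_bins.toNat else 0))
      (List.replicate (if 0 < num_bins then num_bins.toNat else 0) [], List.replicate (if 0 < num_bins then num_bins.toNat else 0) [])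
  else (List.replicate (if 0 < num_bins then num_bins.toNat else 0) [], List.replicate (if 0 < num_bins then num_bins.toNat else 0) [])

def bBD (l : List (String × Int)) (fa_set : List String) (num_bins lo W : Int) : PySem.Dict String (PySem.Dict String (List String)) :=
  (List.range (if 0 < num_bins then num_bins.toNat else 0)).foldl (bStep lo W (bBins l fa_set num_bins lo W)) PySem.Dict.empty

-- the two tails (definitionally the filter_bin_data = true branches of the ports)
def tailATriple (bd : PySem.Dict String (PySem.Dict String (List String))) :
    (List (String × List (String × List String))) × (List (String × List (String × List String))) × List String :=
  (bd.items.map (fun p => (p.1, p.2.items)),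
   (PySem.Dict.ofList (bd.items.filter (fun p => !((bd.items.foldl (fun ek p => if bdFindEmptyFa p.2.items then ek ++ [p.1] else ek) []).contains p.1)))).items.map (fun p => (p.1, p.2.items)),
   bd.items.foldl (fun ek p => if bdFindEmptyFa p.2.items then ek ++ [p.1] else ek) [])

def tailBTriple (bd : PySem.Dict String (PySem.Dict String (List String))) :
    (List (String × List (String × List String))) × (List (String × List (String × List String))) × List String :=
  (bd.items.map (fun p => (p.1, p.2.items)),
   (PySem.Dict.ofList (bd.items.filter (fun p => !(p.2.getD "fa_genes" [] == [])))).items.map (fun p => (p.1, p.2.items)),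
   (bd.items.filter (fun p => p.2.getD "fa_genes" [] == [])).map (fun p => p.1))

-- the common tail: empty-key collection and filtering agree on any bd whose entries all have the two-list shape
theorem tail_eq (bd : PySem.Dict String (PySem.Dict String (List String)))
    (hnd : (bd.items.map (fun p => p.1)).Nodup)
    (hshape : ∀ p ∈ bd.items, ∃ f nf, p.2 = (PySem.Dict.empty.insert "fa_genes" f).insert "non_fa_genes" nf) :
    tailATriple bd = tailBTriple bd := by
  have hek : bd.items.foldl (fun ek p => if bdFindEmptyFa p.2.items then ek ++ [p.1] else ek) []
      = (bd.items.filter (fun p => bdFindEmptyFa p.2.items)).map (fun p => p.1) := by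
    simpa using PySem.List.foldl_append_if (fun p : String × PySem.Dict String (List String) => bdFindEmptyFa p.2.items) (fun p => p.1) bd.items []
  have hpred : ∀ p ∈ bd.items, bdFindEmptyFa p.2.items = (p.2.getD "fa_genes" [] == []) := by
    intro p hp
    obtain ⟨f, nf, he⟩ := hshape p hp
    rw [he, findEmpty_inner, inner_getD]
  have h3 : bd.items.filter (fun p => bdFindEmptyFa p.2.items)
      = bd.items.filter (fun p => p.2.getD "fa_genes" [] == []) :=
    List.filter_congr hpred
  have h2 : bd.items.filter (fun p => !(((bd.items.filter (fun p => bdFindEmptyFa p.2.items)).map (fun p => p.1)).contains p.1))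
      = bd.items.filter (fun p => !(p.2.getD "fa_genes" [] == [])) :=
    List.filter_congr (fun p hp => by
      rw [contains_map_fst_filter bd.items _ hnd p hp, hpred p hp])
  unfold tailATriple tailBTriple
  rw [hek, h2, h3]

theorem setContains_ofList (s : List String) (x : String) :
    PySem.Set.contains (PySem.Set.ofList s) x = s.contains x := by
  by_cases h : x ∈ s
  · have h1 : x ∈ PySem.Set.ofList s := (PySem.Set.mem_ofList _ _).mpr h
    simp [(PySem.Set.contains_iff _ _).mpr h1, h]
  · have h1 : ¬ x ∈ PySem.Set.ofList s := fun hc => h ((PySem.Set.mem_ofList _ _).mp hc)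
    have h2 : ¬ PySem.Set.contains (PySem.Set.ofList s) x = true := fun hc => h1 ((PySem.Set.contains_iff _ _).mp hc)
    simp only [Bool.not_eq_true] at h2
    simp [h2, h]

-- the two dict-building loops build the same dict
theorem bd_eq (l : List (String × Int)) (fa_set : List String) (num_bins lo W : Int)
    (hlo : ∀ p ∈ (PySem.Dict.ofList l).items, lo ≤ p.2) :
    aBD l fa_set num_bins lo W = bBD l fa_set num_bins lo W := by
  unfold aBD bBD
  by_cases hpos : 0 < num_bins
  · obtain ⟨n, hn⟩ : ∃ n : Nat, num_bins = (n : Int) := ⟨num_bins.toNat, by omega⟩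
    subst hn
    have hN : (if (0 : Int) < (n : Int) then ((n : Int)).toNat else 0) = n := by
      rw [if_pos hpos]; exact Int.toNat_natCast n
    simp only [hN]
    rw [PySem.List.pyRange_zero_nat n, List.foldl_map]
    apply PySem.List.foldl_congr_mem
    intro acc i hi
    have hin : i < n := List.mem_range.mp hi
    unfold aStep bStep
    rw [bd_modify_insert, bd_modify_insert, geneFoldA, innerFoldA, mkKeyB_eq]
    have harg : lo + ((i : Int) + 1) * W = lo + (i : Int) * W + W := by ring
    rw [harg]
    congr 1
    have hdec : ∀ p : String × Int, p ∈ (PySem.Dict.ofList l).items → 0 < W →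
        decide (p.2 ≥ lo + (i : Int) * W ∧ p.2 < lo + (i : Int) * W + W)
          = (PySem.Int.floordiv (p.2 - lo) W == (i : Int)) := by
      intro p hp hW
      have hiff : PySem.Int.floordiv (p.2 - lo) W = (i : Int) ↔
          (p.2 ≥ lo + (i : Int) * W ∧ p.2 < lo + (i : Int) * W + W) := by
        rw [PySem.Int.floordiv_eq_iff_of_pos hW]
        have hexp : ((i : Int) + 1) * W = (i : Int) * W + W := by ring
        constructor
        · rintro ⟨h1, h2⟩
          rw [hexp] at h2
          constructor <;> linarith
        · rintro ⟨h1, h2⟩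
          rw [hexp]
          constructor <;> linarith
      by_cases hd : PySem.Int.floordiv (p.2 - lo) W = (i : Int)
      · obtain ⟨c1, c2⟩ := hiff.mp hd
        simp [hd, c1, c2]
      · have hnc : ¬ (p.2 ≥ lo + (i : Int) * W ∧ p.2 < lo + (i : Int) * W + W) :=
          fun hc => hd (hiff.mpr hc)
        simp [hd, hnc]
    unfold bBins
    simp only [hN]
    by_cases hW : 0 < W
    · rw [if_pos hW]
      obtain ⟨hl1, hl2, hchar⟩ := binsFoldB (PySem.Dict.ofList l).items (PySem.Set.ofList fa_set) lo W n hW hlo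
        (List.replicate n []) (List.replicate n []) (by simp) (by simp)
      obtain ⟨e1, e2⟩ := hchar i hin
      rw [e1, e2]
      have hrep : (List.replicate n ([] : List String)).getD i [] = [] := by
        rw [List.getD_eq_getElem?_getD, List.getElem?_replicate]
        split_ifs <;> rfl
      rw [hrep]
      have hfa : (PySem.Dict.ofList l).items.filter (fun p => decide (p.2 ≥ lo + (i : Int) * W ∧ p.2 < lo + (i : Int) * W + W) && fa_set.contains p.1)
          = (PySem.Dict.ofList l).items.filter (fun p => PySem.Int.floordiv (p.2 - lo) W == (i : Int) && PySem.Set.contains (PySem.Set.ofList fa_set) p.1) :=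
        List.filter_congr (fun p hp => by rw [hdec p hp hW, setContains_ofList])
      have hnf : (PySem.Dict.ofList l).items.filter (fun p => decide (p.2 ≥ lo + (i : Int) * W ∧ p.2 < lo + (i : Int) * W + W) && !fa_set.contains p.1)
          = (PySem.Dict.ofList l).items.filter (fun p => PySem.Int.floordiv (p.2 - lo) W == (i : Int) && !PySem.Set.contains (PySem.Set.ofList fa_set) p.1) :=
        List.filter_congr (fun p hp => by rw [hdec p hp hW, setContains_ofList])
      rw [hfa, hnf]
    · rw [if_neg hW]
      have hrep : (List.replicate n ([] : List String)).getD i [] = [] := by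
        rw [List.getD_eq_getElem?_getD, List.getElem?_replicate]
        split_ifs <;> rfl
      rw [hrep]
      have hnil : ∀ c : String × Int → Bool,
          (PySem.Dict.ofList l).items.filter (fun p => decide (p.2 ≥ lo + (i : Int) * W ∧ p.2 < lo + (i : Int) * W + W) && c p) = [] := by
        intro c
        apply List.filter_eq_nil_iff.mpr
        intro p _
        simp only [Bool.and_eq_true, decide_eq_true_eq, not_and]
        rintro ⟨h1, h2⟩
        linarith
      rw [hnil, hnil]
      simp
  · rw [PySem.List.pyRange_one_eq_nil (by omega), if_neg hpos]
    simp

-- the core equality: with min/max already extracted, A's per-bin rescan builds the same dict as B's one-pass binning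
theorem main_core (l : List (String × Int)) (fa_set : List String) (num_bins lo hi : Int)
    (hlo : ∀ p ∈ (PySem.Dict.ofList l).items, lo ≤ p.2) :
    tailATriple (aBD l fa_set num_bins lo (PySem.Int.floordiv (hi - lo) num_bins))
      = tailBTriple (bBD l fa_set num_bins lo (PySem.Int.floordiv (hi - lo) num_bins)) := by
  rw [bd_eq l fa_set num_bins lo _ hlo]
  apply tail_eq
  · have h := PySem.Dict.nodup_keys_foldl_insert_key
      (List.range (if 0 < num_bins then num_bins.toNat else 0))
      (fun i : Nat => mkKeyB (lo + (i : Int) * (PySem.Int.floordiv (hi - lo) num_bins)) (lo + ((i : Int) + 1) * (PySem.Int.floordiv (hi - lo) num_bins)))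
      (fun _ (i : Nat) => (PySem.Dict.empty.insert "fa_genes" ((bBins l fa_set num_bins lo (PySem.Int.floordiv (hi - lo) num_bins)).1.getD i [])).insert "non_fa_genes" ((bBins l fa_set num_bins lo (PySem.Int.floordiv (hi - lo) num_bins)).2.getD i []))
      PySem.Dict.empty (by simp [PySem.Dict.keys, PySem.Dict.empty])
    simpa [PySem.Dict.keys, bBD, bStep] using h
  · intro p hp
    refine shape_foldl_insert
      (List.range (if 0 < num_bins then num_bins.toNat else 0))
      (fun i : Nat => mkKeyB (lo + (i : Int) * (PySem.Int.floordiv (hi - lo) num_bins)) (lo + ((i : Int) + 1) * (PySem.Int.floordiv (hi - lo) num_bins)))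
      (fun i : Nat => (PySem.Dict.empty.insert "fa_genes" ((bBins l fa_set num_bins lo (PySem.Int.floordiv (hi - lo) num_bins)).1.getD i [])).insert "non_fa_genes" ((bBins l fa_set num_bins lo (PySem.Int.floordiv (hi - lo) num_bins)).2.getD i []))
      (fun v => ∃ f nf, v = (PySem.Dict.empty.insert "fa_genes" f).insert "non_fa_genes" nf)
      PySem.Dict.empty (by simp [PySem.Dict.empty]) (fun i _ => ⟨_, _, rfl⟩) p ?_
    simpa [bBD, bStep] using hp

-- ===== VERDICT (by name: the statement is the Claim_ definition above) =====
theorem bin_dictionary_spec : Claim_equal_bin_dictionary := by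
  unfold Claim_equal_bin_dictionary
  intro gene_freq fa_set num_bins filter_bin_data _hdom hpre
  obtain ⟨hne, hnb, hfb⟩ := hpre
  subst hfb
  unfold Spec_bin_dictionary
  rcases hmin : PySem.List.min? (PySem.Dict.ofList gene_freq).values (fun x => x) with _ | lo
  · exfalso
    have hv := (PySem.List.min?_eq_none_iff _ _).mp hmin
    cases gene_freq with
    | nil => exact hne rfl
    | cons x t =>
      apply ofList_items_ne_nil x t
      have : (PySem.Dict.ofList (x :: t)).items.map (fun p => p.2) = [] := by
        simpa [PySem.Dict.values] using hv
      simpa using List.map_eq_nil_iff.mp this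
  rcases hmax : PySem.List.max? (PySem.Dict.ofList gene_freq).values (fun x => x) with _ | hi
  · exfalso
    have hv := (PySem.List.max?_eq_none_iff _ _).mp hmax
    cases gene_freq with
    | nil => exact hne rfl
    | cons x t =>
      apply ofList_items_ne_nil x t
      have : (PySem.Dict.ofList (x :: t)).items.map (fun p => p.2) = [] := by
        simpa [PySem.Dict.values] using hv
      simpa using List.map_eq_nil_iff.mp this
  have hlo : ∀ p ∈ (PySem.Dict.ofList gene_freq).items, lo ≤ p.2 := by
    intro p hp
    exact PySem.List.min?_isMin hmin p.2 (by simp only [PySem.Dict.values]; exact List.mem_map_of_mem hp)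
  simp only [bin_dictionary, bin_dictionary_alt, hmin, hmax]
  exact main_core gene_freq fa_set num_bins lo hi hlo
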